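-- pv_equiv track=rewrite | github.com/fiori007/tcc-call2go | src/analytics/ranking_fusion.py | classify_presence_pattern
-- ===== SOURCE A (Python) =====
-- def classify_presence_pattern(rank_jan, rank_feb, rank_mar) -> str:
--     """
--     Classifica o padrao de presenca de um artista nos charts Q1 (Jan -> Mar).
--
--     Taxonomia estrutural pura baseada unicamente na presenca/ausencia
--     em cada mes do trimestre. Nenhum threshold numerico e usado.
--     A magnitude da variacao de rank e representada em separado pela
--     variavel continua rank_delta (rank_jan - rank_mar).
--
--     Categorias (6):
--         'absent':       nenhum mes presente
--         'single':       exatamente 1 mes presente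
--         'persistent':   presente nos 3 meses (Jan + Fev + Mar)
--         'new':          Jan=ausente E Mar=presente (emergiu no Q1)
--         'exit':         Jan=presente E Mar=ausente (saiu no Q1)
--         'intermittent': Jan=presente E Fev=ausente E Mar=presente
--
--     Parametros:
--         rank_jan, rank_feb, rank_mar: int ou None (None = ausente no mes)
--     """
--     present_count = sum(
--         1 for r in [rank_jan, rank_feb, rank_mar] if r is not None)
--
--     if present_count == 0:
--         return 'absent'
--     if present_count == 1:
--         return 'single'
--     if present_count == 3:
--         return 'persistent'
--     # Exatamente 2 meses presentes: identificar padrao estrutural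
--     if rank_jan is None and rank_mar is not None:
--         return 'new'
--     if rank_jan is not None and rank_mar is None:
--         return 'exit'
--     if rank_jan is not None and rank_feb is None and rank_mar is not None:
--         return 'intermittent'
--     # Fallback (Jan + Fev, sem Mar -- coberto por present_count==2 acima)
--     return 'single'
-- ===== SOURCE B (Python) =====
-- _PATTERN_LABELS = {
--     (False, False, False): 'absent',
--     (False, False, True):  'single',
--     (False, True,  False): 'single',
--     (True,  False, False): 'single',
--     (False, True,  True):  'new',
--     (True,  False, True):  'intermittent',
--     (True,  True,  False): 'exit',
--     (True,  True,  True):  'persistent',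
-- }
--
-- def classify_presence_pattern(rank_jan, rank_feb, rank_mar) -> str:
--     return _PATTERN_LABELS[(rank_jan is not None,
--                             rank_feb is not None,
--                             rank_mar is not None)]
-- ===== Notes on version B (the rewrite author's own statement) =====
-- stated objective: simpler
-- what changed: Replaced the present-count computation and cascade of conditionals with a single lookup of the boolean presence triple in a constant 8-entry table.
import Mathlib
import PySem

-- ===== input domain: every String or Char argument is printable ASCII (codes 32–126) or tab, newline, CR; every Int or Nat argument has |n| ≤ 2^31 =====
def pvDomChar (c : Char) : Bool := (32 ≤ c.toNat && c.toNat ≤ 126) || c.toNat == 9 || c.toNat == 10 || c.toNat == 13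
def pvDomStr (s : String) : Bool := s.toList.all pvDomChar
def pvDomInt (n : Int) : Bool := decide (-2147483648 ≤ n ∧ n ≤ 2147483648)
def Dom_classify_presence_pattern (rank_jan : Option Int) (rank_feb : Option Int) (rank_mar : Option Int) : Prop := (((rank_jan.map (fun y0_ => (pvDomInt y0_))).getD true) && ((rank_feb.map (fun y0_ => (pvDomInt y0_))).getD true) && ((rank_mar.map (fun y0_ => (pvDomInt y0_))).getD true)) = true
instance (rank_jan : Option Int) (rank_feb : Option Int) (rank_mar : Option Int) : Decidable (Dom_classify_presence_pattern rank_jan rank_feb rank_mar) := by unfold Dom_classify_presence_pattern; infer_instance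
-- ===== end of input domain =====

-- B replaces A's present-count plus conditional cascade with one lookup in a constant 8-entry table (objective: simpler).


-- ===== PORT A =====
-- sum(1 for r in [...] if r is not None): fold over the literal list, same branch cascade as A.
def classify_presence_pattern (rank_jan : Option Int) (rank_feb : Option Int) (rank_mar : Option Int) : String :=
  let present_count : Int :=
    [rank_jan, rank_feb, rank_mar].foldl (fun acc r => if r.isSome then acc + 1 else acc) 0
  if present_count = 0 then "absent"
  else if present_count = 1 then "single"
  else if present_count = 3 then "persistent"
  else if rank_jan.isNone && rank_mar.isSome then "new"
  else if rank_jan.isSome && rank_mar.isNone then "exit"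
  else if rank_jan.isSome && rank_feb.isNone && rank_mar.isSome then "intermittent"
  else "single"

-- ===== PORT B =====
-- B: constant table keyed on the presence triple, looked up via first-match association list (Python dict lookup).
def patternLabels : PySem.Dict (Bool × Bool × Bool) String :=
  PySem.Dict.ofList
  [((false, false, false), "absent"),
   ((false, false, true),  "single"),
   ((false, true,  false), "single"),
   ((true,  false, false), "single"),
   ((false, true,  true),  "new"),
   ((true,  false, true),  "intermittent"),
   ((true,  true,  false), "exit"),
   ((true,  true,  true),  "persistent")]

def classify_presence_pattern_alt (rank_jan : Option Int) (rank_feb : Option Int) (rank_mar : Option Int) : String :=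
  (PySem.Dict.get? patternLabels (rank_jan.isSome, rank_feb.isSome, rank_mar.isSome)).getD ""

-- ===== PRECONDITION & SPEC =====
def Spec_classify_presence_pattern (rank_jan : Option Int) (rank_feb : Option Int) (rank_mar : Option Int) (out : String) : Prop := out = classify_presence_pattern_alt rank_jan rank_feb rank_mar
instance (rank_jan : Option Int) (rank_feb : Option Int) (rank_mar : Option Int) (out : String) : Decidable (Spec_classify_presence_pattern rank_jan rank_feb rank_mar out) := by unfold Spec_classify_presence_pattern; infer_instance

-- ===== CLAIM (what is proved, stated in full; the proofs are below) =====
def Claim_equal_classify_presence_pattern : Prop := ∀ (rank_jan : Option Int) (rank_feb : Option Int) (rank_mar : Option Int), Dom_classify_presence_pattern rank_jan rank_feb rank_mar → Spec_classify_presence_pattern rank_jan rank_feb rank_mar (classify_presence_pattern rank_jan rank_feb rank_mar)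

-- ===== LEMMAS AND PROOFS =====

-- ===== VERDICT (by name: the statement is the Claim_ definition above) =====
theorem classify_presence_pattern_spec : Claim_equal_classify_presence_pattern := by
  intro rank_jan rank_feb rank_mar _
  unfold Spec_classify_presence_pattern
  cases rank_jan <;> cases rank_feb <;> cases rank_mar <;> simp [classify_presence_pattern, classify_presence_pattern_alt, patternLabels, PySem.Dict.get?] <;> rfl
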